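-- pv_equiv track=rewrite | github.com/catalinc/programmingpraxis-solutions | python/src/interleave_sort.py | interleave_increase_decrease_sort
-- ===== SOURCE A (Python) =====
-- def interleave_increase_decrease_sort(L):
--     even = []
--     odd = []
--     for i in range(len(L)):
--         if i % 2 == 0:
--             even.append(L[i])
--         else:
--             odd.append(L[i])
--     even.sort()
--     odd.sort(reverse=True)
--     result = []
--     while even and odd:
--         result.append(even.pop(0))
--         result.append(odd.pop(0))
--     if even:
--         result.append(even.pop(0))
--     if odd:
--         result.append(odd.pop(0))
--     return result
-- ===== SOURCE B (Python) =====
-- def interleave_increase_decrease_sort(L):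
--     result = [None] * len(L)
--     result[::2] = sorted(L[::2])
--     result[1::2] = sorted(L[1::2], reverse=True)
--     return result
-- ===== Notes on version B (the rewrite author's own statement) =====
-- stated objective: faster
-- what changed: Replaces the index loop with parity test, the two in-place sorts and the quadratic pop(0) while-loop by slicing the parity halves (L[::2], L[1::2]), sorting them with sorted(), and writing both halves back in one bulk step each via stride slice assignment into a preallocated result.
import Mathlib
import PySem

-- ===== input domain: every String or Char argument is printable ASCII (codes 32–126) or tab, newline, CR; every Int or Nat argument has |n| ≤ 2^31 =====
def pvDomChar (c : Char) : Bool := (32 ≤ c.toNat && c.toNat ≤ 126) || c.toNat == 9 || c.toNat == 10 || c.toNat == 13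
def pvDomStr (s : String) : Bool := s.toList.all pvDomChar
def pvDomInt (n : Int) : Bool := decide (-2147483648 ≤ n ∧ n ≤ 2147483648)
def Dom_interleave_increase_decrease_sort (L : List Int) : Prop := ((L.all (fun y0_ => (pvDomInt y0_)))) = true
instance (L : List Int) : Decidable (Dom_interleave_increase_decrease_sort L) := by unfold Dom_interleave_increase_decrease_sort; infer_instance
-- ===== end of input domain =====

-- B replaces A's parity index-loop, in-place sorts and quadratic pop(0) interleave by
-- slicing the two parity halves, sorting them, and stride slice-assigning them back (faster).

-- ===== PORT A =====
-- the 'while even and odd: result.append(even.pop(0)); result.append(odd.pop(0))' loop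
-- followed by 'if even: …  if odd: …' (each appends ONE popped element, literally as in A)
def pvWhileA : List Int → List Int → List Int
  | x :: e, y :: o => x :: y :: pvWhileA e o
  | e, o =>
    (match e with | x :: _ => [x] | [] => []) ++
    (match o with | y :: _ => [y] | [] => [])

def interleave_increase_decrease_sort (L : List Int) : List Int :=
  -- for i in range(len(L)): append L[i] to even or odd by i % 2 (i ≥ 0, so Int % matches Python %)
  let p := (PySem.List.pyRange 0 (L.length : Int) 1).foldl
    (fun (p : List Int × List Int) i =>
      if i % 2 == 0 then (p.1 ++ [PySem.List.pyGetD L i 0], p.2)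
      else (p.1, p.2 ++ [PySem.List.pyGetD L i 0])) ([], [])
  let even := PySem.List.sorted p.1 (fun x => x) false   -- even.sort()
  let odd  := PySem.List.sorted p.2 (fun x => x) true    -- odd.sort(reverse=True)
  pvWhileA even odd

-- ===== PORT B =====
-- L[::2] (and, applied to L.tail, L[1::2]): every second element
def pvEveryOther : List Int → List Int
  | [] => []
  | [x] => [x]
  | x :: _ :: r => x :: pvEveryOther r

-- the two stride slice-assignments result[::2] = e; result[1::2] = o (lengths match by
-- construction): position 0 from e, then the roles swap
def pvWeave : List Int → List Int → List Int
  | [], _ => []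
  | x :: e, o => x :: pvWeave o e
termination_by e o => e.length + o.length
decreasing_by simp; omega

def interleave_increase_decrease_sort_alt (L : List Int) : List Int :=
  let even := PySem.List.sorted (pvEveryOther L) (fun x => x) false        -- sorted(L[::2])
  let odd  := PySem.List.sorted (pvEveryOther L.tail) (fun x => x) true    -- sorted(L[1::2], reverse=True)
  pvWeave even odd

-- ===== PRECONDITION & SPEC =====
def Spec_interleave_increase_decrease_sort (L : List Int) (out : List Int) : Prop := out = interleave_increase_decrease_sort_alt L
instance (L : List Int) (out : List Int) : Decidable (Spec_interleave_increase_decrease_sort L out) := by unfold Spec_interleave_increase_decrease_sort; infer_instance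

-- ===== CLAIM (what is proved, stated in full; the proofs are below) =====
def Claim_equal_interleave_increase_decrease_sort : Prop := ∀ (L : List Int), Dom_interleave_increase_decrease_sort L → Spec_interleave_increase_decrease_sort L (interleave_increase_decrease_sort L)

-- ===== LEMMAS AND PROOFS =====

lemma pvEveryOther_cons (x : Int) (xs : List Int) :
    pvEveryOther (x :: xs) = x :: pvEveryOther xs.tail := by
  cases xs <;> simp [pvEveryOther]

lemma pvEveryOther_length : ∀ L : List Int, (pvEveryOther L).length = (L.length + 1) / 2
  | [] => by simp [pvEveryOther]
  | [x] => by simp [pvEveryOther]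
  | x :: y :: r => by
    simp [pvEveryOther, pvEveryOther_length r]; omega

-- A's parity-split fold, run over enumerate, produces the two parity slices
lemma pvSplit_enum : ∀ (L : List Int) (k : Int) (e o : List Int),
    (PySem.List.enumerate L k).foldl
      (fun (p : List Int × List Int) q =>
        if q.1 % 2 == 0 then (p.1 ++ [q.2], p.2) else (p.1, p.2 ++ [q.2])) (e, o)
    = if k % 2 == 0 then (e ++ pvEveryOther L, o ++ pvEveryOther L.tail)
      else (e ++ pvEveryOther L.tail, o ++ pvEveryOther L)
  | [], k, e, o => by simp [PySem.List.enumerate_nil, pvEveryOther]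
  | x :: xs, k, e, o => by
    rw [PySem.List.enumerate_cons]
    simp only [List.foldl_cons]
    have hk : k % 2 = 0 ∨ k % 2 = 1 := Int.emod_two_eq_zero_or_one k
    rcases hk with h | h
    · have h1 : (k + 1) % 2 = 1 := by omega
      have hrec := pvSplit_enum xs (k + 1) (e ++ [x]) o
      rw [h1] at hrec
      simp only [h]
      exact hrec.trans (by simp [pvEveryOther_cons])
    · have h1 : (k + 1) % 2 = 0 := by omega
      have hrec := pvSplit_enum xs (k + 1) e (o ++ [x])
      rw [h1] at hrec
      simp only [h]
      exact hrec.trans (by simp [pvEveryOther_cons])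

-- A's tail-handling interleave equals B's swapping weave when the first list is the
-- longer half by at most one (always the case for the parity split)
lemma pvWhileA_eq_weave : ∀ (e o : List Int),
    o.length ≤ e.length → e.length ≤ o.length + 1 → pvWhileA e o = pvWeave e o
  | [], o, h1, _ => by
    have : o = [] := List.eq_nil_of_length_eq_zero (by simpa using Nat.le_zero.mp h1)
    subst this; simp [pvWhileA, pvWeave]
  | x :: e, [], _, h2 => by
    simp only [List.length_cons, List.length_nil] at h2
    have he : e = [] := List.eq_nil_of_length_eq_zero (by omega)
    subst he; simp [pvWhileA, pvWeave]
  | x :: e, y :: o, h1, h2 => by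
    simp only [pvWhileA, pvWeave]
    rw [pvWhileA_eq_weave e o (by simpa using h1) (by simp at h2 ⊢; omega)]

-- ===== VERDICT (by name: the statement is the Claim_ definition above) =====
theorem interleave_increase_decrease_sort_spec : Claim_equal_interleave_increase_decrease_sort := by
  intro L _
  unfold Spec_interleave_increase_decrease_sort
  unfold interleave_increase_decrease_sort interleave_increase_decrease_sort_alt
  have henum := PySem.List.enumerate_eq_map_pyRange L (0 : Int)
  have hsplit : (PySem.List.pyRange 0 (L.length : Int) 1).foldl
      (fun (p : List Int × List Int) i =>
        if i % 2 == 0 then (p.1 ++ [PySem.List.pyGetD L i 0], p.2)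
        else (p.1, p.2 ++ [PySem.List.pyGetD L i 0])) ([], [])
      = (pvEveryOther L, pvEveryOther L.tail) := by
    have := pvSplit_enum L 0 [] []
    rw [henum, List.foldl_map] at this
    simpa using this
  simp only [hsplit]
  apply pvWhileA_eq_weave
  · rw [PySem.List.length_sorted, PySem.List.length_sorted,
        pvEveryOther_length, pvEveryOther_length]
    cases L <;> simp <;> omega
  · rw [PySem.List.length_sorted, PySem.List.length_sorted,
        pvEveryOther_length, pvEveryOther_length]
    cases L <;> simp <;> omega
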